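-- pv_equiv track=rewrite | github.com/okfde/offenerhaushalt-daten | Brandenburg/main.py | join_and_undash
-- ===== SOURCE A (Python) =====
-- def join_and_undash(parts):
--     result = ""
--     for i in range(len(parts)):
--         prev = parts[i - 1] if i > 0 else ""
--         current_part = parts[i]
--         if current_part.endswith("-"):
--             current_part = current_part[:-1]
--         if prev.endswith("-"):
--             result += current_part
--         else:
--             result += " " + current_part
--     return result.strip()
-- ===== SOURCE B (Python) =====
-- def join_and_undash(parts):
--     # stateless: each part yields its content (trailing '-' removed) plus a
--     # trailing space unless it hyphenates into the next; strip fixes the ends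
--     return "".join(p[:-1] if p.endswith("-") else p + " " for p in parts).strip()
-- ===== Notes on version B (the rewrite author's own statement) =====
-- stated objective: simpler
-- what changed: B replaces A's stateful index loop (which looks back at the previous part to decide whether to prepend a space while concatenating onto an accumulator) with a stateless per-element transform -- each part becomes its dash-stripped content followed by a space unless it itself ends with '-' -- emitted by one ''.join + strip; no accumulator and no previous-part state exist in B.
import Mathlib
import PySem

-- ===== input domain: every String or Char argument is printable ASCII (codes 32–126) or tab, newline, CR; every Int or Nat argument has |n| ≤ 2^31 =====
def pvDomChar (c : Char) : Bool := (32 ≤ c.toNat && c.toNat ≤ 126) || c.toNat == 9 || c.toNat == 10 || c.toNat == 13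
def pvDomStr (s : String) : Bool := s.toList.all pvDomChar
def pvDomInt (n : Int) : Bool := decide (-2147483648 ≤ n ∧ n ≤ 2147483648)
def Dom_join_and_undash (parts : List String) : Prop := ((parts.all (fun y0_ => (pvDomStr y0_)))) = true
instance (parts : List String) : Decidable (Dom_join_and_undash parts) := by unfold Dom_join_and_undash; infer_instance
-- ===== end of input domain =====

-- B replaces A's stateful prev-looking accumulator loop with a stateless per-part
-- transform (content + trailing space unless the part ends with '-') joined once and
-- stripped (objective: simpler).

-- ===== PORT A =====
-- the loop body of A (result += current / " " + current, after undashing)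
def pvBodyA (parts : List String) (result : String) (i : Int) : String :=
  let prev := if 0 < i then PySem.List.pyGetD parts (i - 1) "" else ""
  let current0 := PySem.List.pyGetD parts i ""
  let current := if PySem.Str.endswith current0 "-" = true then
      PySem.Str.slice current0 none (some (-1)) else current0
  if PySem.Str.endswith prev "-" = true then result ++ current else result ++ " " ++ current

def join_and_undash (parts : List String) : String :=
  let result := (PySem.List.pyRange 0 (parts.length : Int) 1).foldl (pvBodyA parts) ""
  PySem.Str.strip result

-- ===== PORT B =====
-- B: "".join(p[:-1] if p.endswith("-") else p + " " for p in parts).strip()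
def pvPieceB (p : String) : String :=
  if PySem.Str.endswith p "-" = true then PySem.Str.slice p none (some (-1)) else p ++ " "

def join_and_undash_alt (parts : List String) : String :=
  PySem.Str.strip (PySem.Str.join "" (parts.map pvPieceB))

-- ===== PRECONDITION & SPEC =====
def Spec_join_and_undash (parts : List String) (out : String) : Prop := out = join_and_undash_alt parts
instance (parts : List String) (out : String) : Decidable (Spec_join_and_undash parts out) := by unfold Spec_join_and_undash; infer_instance

-- ===== CLAIM (what is proved, stated in full; the proofs are below) =====
def Claim_equal_join_and_undash : Prop := ∀ (parts : List String), Dom_join_and_undash parts → Spec_join_and_undash parts (join_and_undash parts)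

-- ===== LEMMAS AND PROOFS =====

-- the undashed content of a part
def pvContent (p : String) : String :=
  if PySem.Str.endswith p "-" = true then PySem.Str.slice p none (some (-1)) else p

-- the characters A's loop appends for the remaining parts, given whether the previous raw part ended in '-'
def pvSpecA : List String → Bool → List Char
  | [], _ => []
  | p :: ps, pd =>
      (if pd then (pvContent p).toList else ' ' :: (pvContent p).toList)
        ++ pvSpecA ps (PySem.Str.endswith p "-")

-- the characters of B's joined string
def pvSpecB : List String → List Char
  | [] => []
  | p :: ps =>
      (pvContent p).toList ++ (if PySem.Str.endswith p "-" = true then [] else [' '])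
        ++ pvSpecB ps

-- whether the last part of `ps` ends with '-' (default pd)
def pvLastDash : Bool → List String → Bool
  | pd, [] => pd
  | _, p :: ps => pvLastDash (PySem.Str.endswith p "-") ps

def pvSep (b : Bool) : List Char := if b then [] else [' ']

theorem pvSpec_rel (ps : List String) : ∀ pd : Bool,
    pvSep pd ++ pvSpecB ps = pvSpecA ps pd ++ pvSep (pvLastDash pd ps) := by
  induction ps with
  | nil => intro pd; simp [pvSpecB, pvSpecA, pvLastDash]
  | cons p ps ih =>
    intro pd
    have h1 : pvSep pd ++ (pvContent p).toList
        = (if pd then (pvContent p).toList else ' ' :: (pvContent p).toList) := by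
      cases pd <;> simp [pvSep]
    calc pvSep pd ++ pvSpecB (p :: ps)
        = (pvSep pd ++ (pvContent p).toList)
            ++ (pvSep (PySem.Str.endswith p "-") ++ pvSpecB ps) := by
          simp [pvSpecB, pvSep, List.append_assoc]
      _ = (if pd then (pvContent p).toList else ' ' :: (pvContent p).toList)
            ++ (pvSpecA ps (PySem.Str.endswith p "-")
                 ++ pvSep (pvLastDash (PySem.Str.endswith p "-") ps)) := by
          rw [h1, ih]
      _ = pvSpecA (p :: ps) pd ++ pvSep (pvLastDash pd (p :: ps)) := by
          simp [pvSpecA, pvLastDash, List.append_assoc]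

theorem join_nil_flatten (l : List (List Char)) :
    PySem.Chars.join [] l = l.flatten := by
  induction l with
  | nil => simp [PySem.Chars.join, List.intercalate]
  | cons x xs ih =>
    cases xs with
    | nil => simp [PySem.Chars.join, List.intercalate]
    | cons y ys =>
      simp only [PySem.Chars.join, List.intercalate] at ih ⊢
      simp only [List.intersperse, List.flatten_cons] at ih ⊢
      simpa [List.intersperse] using congrArg (x ++ ·) ih

theorem B_chars (parts : List String) :
    (PySem.Str.join "" (parts.map pvPieceB)).toList = pvSpecB parts := by
  have hnil : ("" : String).toList = ([] : List Char) := rfl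
  induction parts with
  | nil => simp [PySem.Str.toList_join, hnil, pvSpecB]
  | cons p ps ih =>
    simp only [PySem.Str.toList_join, hnil, join_nil_flatten, List.map_cons,
      List.flatten_cons] at ih ⊢
    rw [ih]
    have : (pvPieceB p).toList
        = (pvContent p).toList ++ (if PySem.Str.endswith p "-" = true then [] else [' ']) := by
      by_cases h : PySem.Chars.endswith p.toList ['-'] = true <;>
        simp [pvPieceB, pvContent, PySem.Str.endswith, h, String.toList_append]
    rw [this]
    simp [pvSpecB, List.append_assoc]

theorem A_loop (parts : List String) : ∀ (ps pre : List String) (acc : String),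
    parts = pre ++ ps →
    (((PySem.List.pyRange (pre.length : Int) (parts.length : Int) 1).foldl (pvBodyA parts) acc)).toList
      = acc.toList ++ pvSpecA ps (PySem.Str.endswith (pre.getLastD "") "-") := by
  intro ps
  induction ps with
  | nil =>
    intro pre acc h
    subst h
    simp [PySem.List.pyRange, pvSpecA]
  | cons p ps ih =>
    intro pre acc h
    have hlt : (pre.length : Int) < (parts.length : Int) := by
      subst h; simp
    rw [PySem.List.pyRange_one_cons hlt, List.foldl_cons]
    have hcur : PySem.List.pyGetD parts ((pre.length : Nat) : Int) "" = p := by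
      rw [PySem.List.pyGetD_natCast]
      subst h
      simp [List.getD_eq_getElem?_getD]
    have hprev : (if 0 < (pre.length : Int) then PySem.List.pyGetD parts ((pre.length : Int) - 1) "" else "")
        = pre.getLastD "" := by
      clear ih hlt hcur
      subst h
      cases pre with
      | nil => simp
      | cons q pre' =>
        rw [if_pos (by simp)]
        have h2 : (((q :: pre').length : Nat) : Int) - 1 = (((q :: pre').length - 1 : Nat) : Int) := by
          simp
        rw [h2, PySem.List.pyGetD_natCast]
        rw [List.getD_eq_getElem?_getD, List.getElem?_append_left (by simp)]
        rw [List.getElem?_eq_getElem (by simp)]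
        simp only [List.getLastD_eq_getLast?, List.getLast?_eq_getElem?, Option.getD_some,
          List.length_cons, Nat.add_sub_cancel, List.getElem?_eq_getElem (by simp : pre'.length < (q :: pre').length)]
        rfl
    have hbody : pvBodyA parts acc ((pre.length : Nat) : Int)
        = if PySem.Str.endswith (pre.getLastD "") "-" = true then acc ++ pvContent p
          else acc ++ " " ++ pvContent p := by
      simp only [pvBodyA, hprev, hcur, pvContent]
    have hparts : parts = (pre ++ [p]) ++ ps := by simp [h]
    have hlen : ((pre ++ [p]).length : Int) = (pre.length : Int) + 1 := by simp
    have ihs := ih (pre ++ [p]) (pvBodyA parts acc ((pre.length : Nat) : Int)) hparts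
    rw [hlen] at ihs
    rw [ihs, hbody]
    rw [List.getLastD_concat]
    cases hpd : PySem.Str.endswith (pre.getLastD "") "-" with
    | true => simp [pvSpecA]
    | false => simp [pvSpecA]

theorem strip_space_cons (s : List Char) :
    PySem.Chars.strip (' ' :: s) = PySem.Chars.strip s := by
  simp [PySem.Chars.strip, PySem.Chars.lstrip, PySem.Chars.isspace]

theorem rstrip_space_concat (s : List Char) :
    PySem.Chars.rstrip (s ++ [' ']) = PySem.Chars.rstrip s := by
  simp [PySem.Chars.rstrip, PySem.Chars.isspace]

theorem lstrip_append (s t : List Char) :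
    PySem.Chars.lstrip (s ++ t)
      = if PySem.Chars.lstrip s = [] then PySem.Chars.lstrip t
        else PySem.Chars.lstrip s ++ t := by
  induction s with
  | nil => simp [PySem.Chars.lstrip]
  | cons c s ih =>
    by_cases h : PySem.Chars.isspace c = true
    · simpa [PySem.Chars.lstrip, h] using ih
    · simp [PySem.Chars.lstrip, h]

theorem strip_space_concat (s : List Char) :
    PySem.Chars.strip (s ++ [' ']) = PySem.Chars.strip s := by
  by_cases h : PySem.Chars.lstrip s = []
  · have : PySem.Chars.strip (s ++ [' '])
        = PySem.Chars.rstrip (PySem.Chars.lstrip [' ']) := by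
      simp [PySem.Chars.strip, lstrip_append, h]
    rw [this]
    have h2 : PySem.Chars.lstrip [' '] = ([] : List Char) := by decide
    simp [PySem.Chars.strip, h, h2]
  · simp [PySem.Chars.strip, lstrip_append, h, rstrip_space_concat]

-- ===== VERDICT (by name: the statement is the Claim_ definition above) =====
theorem join_and_undash_spec : Claim_equal_join_and_undash := by
  intro parts _
  unfold Spec_join_and_undash
  apply String.toList_inj.mp
  have hA := A_loop parts parts [] "" (by simp)
  simp only [List.length_nil, Nat.cast_zero] at hA
  have hend : PySem.Str.endswith (([] : List String).getLastD "") "-" = false := by decide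
  rw [hend] at hA
  simp only [join_and_undash, join_and_undash_alt, PySem.Str.toList_strip]
  rw [hA, B_chars]
  have key := pvSpec_rel parts false
  simp only [pvSep, if_neg (Bool.false_ne_true)] at key
  have h3 : ("" : String).toList = [] := rfl
  rw [h3, List.nil_append]
  have : PySem.Chars.strip ([' '] ++ pvSpecB parts)
      = PySem.Chars.strip (pvSpecA parts false ++ (if pvLastDash false parts then [] else [' '])) := by
    rw [key]
  rw [List.singleton_append, strip_space_cons] at this
  rw [this]
  cases hld : pvLastDash false parts with
  | true => simp
  | false => simp [strip_space_concat]
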